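-- pv_equiv track=rewrite | github.com/redsuns78/pythonexercise | ALGORITHM_STUDY/bfs_farthest_node.py | bfs
-- ===== SOURCE A (Python) =====
-- from collections import deque
--
-- def bfs(graph, start):
--   queue = deque()
--   queue.append([start, 1])
--   visited = {}
--   max_level = 0
--
--   while(queue):
--     node, level = queue.popleft()
--     if node not in visited:
--       visited[node] = level
--       if max_level < level:
--         max_level = level
--
--       if node in graph:
--         for subnode in graph[node]:
--           queue.append([subnode, level+1])
--
--   return visited, max_level
-- ===== SOURCE B (Python) =====
-- def bfs(graph, start):
--   visited = {}
--   max_level = 0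
--   frontier = [start]
--   level = 1
--   while frontier:
--     next_frontier = []
--     for node in frontier:
--       if node not in visited:
--         visited[node] = level
--         if max_level < level:
--           max_level = level
--         if node in graph:
--           next_frontier.extend(graph[node])
--     frontier = next_frontier
--     level += 1
--   return visited, max_level
-- ===== Notes on version B (the rewrite author's own statement) =====
-- stated objective: alternative
-- what changed: Replaced the single deque of [node,level] pairs by level-synchronous BFS: a plain list frontier per level with an integer level counter, building next_frontier in an inner for loop, so no (node,level) pairs are ever stored.
import Mathlib
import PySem

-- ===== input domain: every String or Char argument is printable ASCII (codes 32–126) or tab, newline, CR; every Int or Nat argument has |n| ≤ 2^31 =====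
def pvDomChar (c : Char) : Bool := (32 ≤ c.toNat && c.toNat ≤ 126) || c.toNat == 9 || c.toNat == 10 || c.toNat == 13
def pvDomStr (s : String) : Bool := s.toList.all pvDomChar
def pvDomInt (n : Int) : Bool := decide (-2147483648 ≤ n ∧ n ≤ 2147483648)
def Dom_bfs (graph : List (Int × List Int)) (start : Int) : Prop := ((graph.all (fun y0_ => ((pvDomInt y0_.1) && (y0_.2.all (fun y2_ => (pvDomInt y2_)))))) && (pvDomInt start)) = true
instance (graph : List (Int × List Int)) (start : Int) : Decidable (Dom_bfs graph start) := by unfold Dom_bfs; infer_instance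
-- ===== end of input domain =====

-- B replaces A's deque of [node,level] pairs by level-synchronous BFS (frontier list per level); same result, alternative decomposition.

-- dict lookup on the graph parameter ('node in graph' / 'graph[node]'): first-match association-list lookup
def gget (graph : List (Int × List Int)) (n : Int) : Option (List Int) :=
  (PySem.Dict.mk graph).get? n

-- number of graph keys not yet visited (termination measure for both loops)
def unvis (graph : List (Int × List Int)) (v : PySem.Dict Int Int) : Nat :=
  (graph.filter (fun p => !(v.contains p.1))).length

-- termination lemmas (cited by decreasing_by of the ports, so they live above them)
theorem unvis_mono (graph : List (Int × List Int)) (v v' : PySem.Dict Int Int)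
    (h : ∀ k, v.contains k = true → v'.contains k = true) : unvis graph v' ≤ unvis graph v := by
  induction graph with
  | nil => simp [unvis]
  | cons p rest ih =>
    simp only [unvis, List.filter_cons] at ih ⊢
    cases hp : v.contains p.1 with
    | true =>
      rw [h p.1 hp]
      simpa using ih
    | false =>
      cases hq : v'.contains p.1 <;> simp <;> omega

theorem gget_eq_none_iff (graph : List (Int × List Int)) (n : Int) :
    gget graph n = none ↔ n ∉ graph.map (·.1) := by
  induction graph with
  | nil => simp [gget, PySem.Dict.get?]
  | cons p rest ih =>
    unfold gget at ih ⊢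
    rw [PySem.Dict.get?_mk_cons]
    by_cases hp : p.1 = n
    · simp [hp]
    · simp [hp, ih, Ne.symm hp]

theorem mem_keys_of_gget_some (graph : List (Int × List Int)) (n : Int) (nbrs : List Int)
    (h : gget graph n = some nbrs) : n ∈ graph.map (·.1) := by
  by_contra hn
  rw [← gget_eq_none_iff] at hn
  rw [hn] at h
  simp at h

theorem contains_insert_mono (v : PySem.Dict Int Int) (n lv : Int) :
    ∀ k, v.contains k = true → (v.insert n lv).contains k = true := by
  intro k hk
  rw [PySem.Dict.contains_insert]
  simp [hk]

theorem unvis_strict (graph : List (Int × List Int)) (v v' : PySem.Dict Int Int) (n : Int)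
    (hmem : n ∈ graph.map (·.1)) (hv : v.contains n = false) (hv' : v'.contains n = true)
    (h : ∀ k, v.contains k = true → v'.contains k = true) : unvis graph v' < unvis graph v := by
  induction graph with
  | nil => simp at hmem
  | cons p rest ih =>
    simp only [List.map_cons, List.mem_cons] at hmem
    simp only [unvis, List.filter_cons] at ih ⊢
    rcases hmem with hm | hm
    · subst hm
      rw [hv, hv']
      have h0 := unvis_mono rest v v' h
      simp only [unvis] at h0
      simp
      omega
    · have := ih hm
      cases hp : v.contains p.1 with
      | true =>
        rw [h p.1 hp]
        simpa using this
      | false =>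
        cases hq : v'.contains p.1 <;> simp <;> omega

theorem unvis_insert_of_gget_none (graph : List (Int × List Int)) (v : PySem.Dict Int Int)
    (n lv : Int) (h : gget graph n = none) : unvis graph (v.insert n lv) = unvis graph v := by
  unfold unvis
  congr 1
  apply List.filter_congr
  intro p hp
  have hne : p.1 ≠ n := by
    intro e
    exact (gget_eq_none_iff graph n).mp h (e ▸ List.mem_map_of_mem hp)
  simp [PySem.Dict.contains_insert, hne]

-- ===== PORT A =====
def bfsLoop (graph : List (Int × List Int)) (queue : List (Int × Int))
    (visited : PySem.Dict Int Int) (maxLevel : Int) : (List (Int × Int)) × Int :=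
  match queue with
  | [] => (visited.items, maxLevel)
  | (node, level) :: rest =>
    if visited.contains node then
      bfsLoop graph rest visited maxLevel
    else
      match h : gget graph node with
      | some nbrs =>
        bfsLoop graph (rest ++ nbrs.map (fun s => (s, level + 1)))
          (visited.insert node level) (if maxLevel < level then level else maxLevel)
      | none =>
        bfsLoop graph rest (visited.insert node level)
          (if maxLevel < level then level else maxLevel)
  termination_by (unvis graph visited, queue.length)
  decreasing_by
  · apply Prod.Lex.right; simp
  · apply Prod.Lex.left
    exact unvis_strict graph visited _ node (mem_keys_of_gget_some graph node nbrs h)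
      (by simpa using ‹¬ visited.contains node = true›)
      (PySem.Dict.contains_insert_self _ _ _) (contains_insert_mono _ _ _)
  · rw [unvis_insert_of_gget_none graph visited node level h]
    apply Prod.Lex.right; simp

def bfs (graph : List (Int × List Int)) (start : Int) : (List (Int × Int)) × Int :=
  bfsLoop graph [(start, 1)] PySem.Dict.empty 0

-- ===== PORT B =====
-- the inner 'for node in frontier' loop of B: threads (visited, max_level, next_frontier)
def wave (graph : List (Int × List Int)) (level : Int) (frontier : List Int)
    (visited : PySem.Dict Int Int) (maxLevel : Int) (nextF : List Int) :
    PySem.Dict Int Int × Int × List Int :=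
  match frontier with
  | [] => (visited, maxLevel, nextF)
  | n :: rest =>
    if visited.contains n then wave graph level rest visited maxLevel nextF
    else
      match gget graph n with
      | some nbrs =>
        wave graph level rest (visited.insert n level)
          (if maxLevel < level then level else maxLevel) (nextF ++ nbrs)
      | none =>
        wave graph level rest (visited.insert n level)
          (if maxLevel < level then level else maxLevel) nextF

theorem wave_contains_mono (graph : List (Int × List Int)) (level : Int) (frontier : List Int)
    (visited : PySem.Dict Int Int) (maxLevel : Int) (nextF : List Int) :
    ∀ k, visited.contains k = true →
      (wave graph level frontier visited maxLevel nextF).1.contains k = true := by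
  induction frontier generalizing visited maxLevel nextF with
  | nil => intro k hk; simpa [wave] using hk
  | cons n rest ih =>
    intro k hk
    rw [wave]
    split
    · exact ih _ _ _ k hk
    · split
      · exact ih _ _ _ k (contains_insert_mono _ _ _ k hk)
      · exact ih _ _ _ k (contains_insert_mono _ _ _ k hk)

theorem wave_strict (graph : List (Int × List Int)) (level : Int) (frontier : List Int)
    (visited : PySem.Dict Int Int) (maxLevel : Int) (nextF : List Int)
    (hgrow : (wave graph level frontier visited maxLevel nextF).2.2.length > nextF.length) :
    unvis graph (wave graph level frontier visited maxLevel nextF).1 < unvis graph visited := by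
  induction frontier generalizing visited maxLevel nextF with
  | nil => simp [wave] at hgrow
  | cons n rest ih =>
    rw [wave] at hgrow ⊢
    by_cases hnc : visited.contains n = true
    · rw [if_pos hnc] at hgrow ⊢
      exact ih _ _ _ hgrow
    · rw [if_neg hnc] at hgrow ⊢
      cases hgg : gget graph n with
      | some nbrs =>
        simp only [hgg] at hgrow ⊢
        calc unvis graph (wave graph level rest (visited.insert n level)
              (if maxLevel < level then level else maxLevel) (nextF ++ nbrs)).1
            ≤ unvis graph (visited.insert n level) :=
              unvis_mono _ _ _ (wave_contains_mono _ _ _ _ _ _)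
          _ < unvis graph visited :=
              unvis_strict graph visited _ n (mem_keys_of_gget_some graph n nbrs hgg)
                (by simpa using hnc) (PySem.Dict.contains_insert_self _ _ _)
                (contains_insert_mono _ _ _)
      | none =>
        simp only [hgg] at hgrow ⊢
        have h1 := ih (visited.insert n level)
          (if maxLevel < level then level else maxLevel) nextF hgrow
        have h2 := unvis_mono graph visited (visited.insert n level) (contains_insert_mono _ _ _)
        omega

def bfsAltLoop (graph : List (Int × List Int)) (frontier : List Int) (level : Int)
    (visited : PySem.Dict Int Int) (maxLevel : Int) : (List (Int × Int)) × Int :=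
  match frontier with
  | [] => (visited.items, maxLevel)
  | n :: rest =>
    let r := wave graph level (n :: rest) visited maxLevel []
    bfsAltLoop graph r.2.2 (level + 1) r.1 r.2.1
  termination_by (unvis graph visited, frontier.length)
  decreasing_by
    have hm : unvis graph (wave graph level (n :: rest) visited maxLevel []).1
        ≤ unvis graph visited := unvis_mono _ _ _ (wave_contains_mono _ _ _ _ _ _)
    rcases Nat.lt_or_ge (unvis graph (wave graph level (n :: rest) visited maxLevel []).1)
        (unvis graph visited) with hlt | hge
    · exact Prod.Lex.left _ _ hlt
    · have heq : unvis graph (wave graph level (n :: rest) visited maxLevel []).1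
          = unvis graph visited := Nat.le_antisymm hm hge
      rw [heq]
      apply Prod.Lex.right
      cases hnf : (wave graph level (n :: rest) visited maxLevel []).2.2 with
      | nil => simp
      | cons a l =>
        exfalso
        have := wave_strict graph level (n :: rest) visited maxLevel [] (by simp [hnf])
        omega

def bfs_alt (graph : List (Int × List Int)) (start : Int) : (List (Int × Int)) × Int :=
  bfsAltLoop graph [start] 1 PySem.Dict.empty 0

-- ===== PRECONDITION & SPEC =====
def Spec_bfs (graph : List (Int × List Int)) (start : Int) (out : (List (Int × Int)) × Int) : Prop := out = bfs_alt graph start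
instance (graph : List (Int × List Int)) (start : Int) (out : (List (Int × Int)) × Int) : Decidable (Spec_bfs graph start out) := by unfold Spec_bfs; infer_instance

-- ===== CLAIM (what is proved, stated in full; the proofs are below) =====
def Claim_equal_bfs : Prop := ∀ (graph : List (Int × List Int)) (start : Int), Dom_bfs graph start → Spec_bfs graph start (bfs graph start)

-- ===== LEMMAS AND PROOFS =====

theorem wave_acc (graph : List (Int × List Int)) (lv : Int) (f : List Int)
    (v : PySem.Dict Int Int) (m : Int) (acc : List Int) :
    wave graph lv f v m acc =
      ((wave graph lv f v m []).1, (wave graph lv f v m []).2.1,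
        acc ++ (wave graph lv f v m []).2.2) := by
  induction f generalizing v m acc with
  | nil => simp [wave]
  | cons n rest ih =>
    rw [wave, wave]
    by_cases hnc : v.contains n = true
    · simp only [if_pos hnc]
      exact ih _ _ _
    · simp only [if_neg hnc]
      cases hgg : gget graph n with
      | some nbrs =>
        simp only []
        rw [ih _ _ (acc ++ nbrs), ih _ _ ([] ++ nbrs)]
        simp
      | none => exact ih _ _ _

theorem altLoop_step (graph : List (Int × List Int)) (f : List Int) (lv : Int)
    (v : PySem.Dict Int Int) (m : Int) :
    bfsAltLoop graph f lv v m =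
      bfsAltLoop graph (wave graph lv f v m []).2.2 (lv + 1)
        (wave graph lv f v m []).1 (wave graph lv f v m []).2.1 := by
  cases f with
  | nil => rw [bfsAltLoop]; simp [wave]; rw [bfsAltLoop]
  | cons n rest => rw [bfsAltLoop]

theorem bfsLoop_cons_visited (graph : List (Int × List Int)) (node level : Int)
    (rest : List (Int × Int)) (visited : PySem.Dict Int Int) (maxLevel : Int)
    (hc : visited.contains node = true) :
    bfsLoop graph ((node, level) :: rest) visited maxLevel =
      bfsLoop graph rest visited maxLevel := by
  rw [bfsLoop]
  simp [hc]

theorem bfsLoop_cons_some (graph : List (Int × List Int)) (node level : Int)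
    (rest : List (Int × Int)) (visited : PySem.Dict Int Int) (maxLevel : Int) (nbrs : List Int)
    (hc : visited.contains node = false) (hgg : gget graph node = some nbrs) :
    bfsLoop graph ((node, level) :: rest) visited maxLevel =
      bfsLoop graph (rest ++ nbrs.map (fun s => (s, level + 1)))
        (visited.insert node level) (if maxLevel < level then level else maxLevel) := by
  rw [bfsLoop]
  simp only [hc, Bool.false_eq_true, if_false]
  split
  · rename_i nbrs' h'
    rw [hgg] at h'
    cases h'
    rfl
  · rename_i h'
    rw [hgg] at h'
    cases h'

theorem bfsLoop_cons_none (graph : List (Int × List Int)) (node level : Int)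
    (rest : List (Int × Int)) (visited : PySem.Dict Int Int) (maxLevel : Int)
    (hc : visited.contains node = false) (hgg : gget graph node = none) :
    bfsLoop graph ((node, level) :: rest) visited maxLevel =
      bfsLoop graph rest (visited.insert node level)
        (if maxLevel < level then level else maxLevel) := by
  rw [bfsLoop]
  simp only [hc, Bool.false_eq_true, if_false]
  split
  · rename_i nbrs' h'
    rw [hgg] at h'
    cases h'
  · rfl

theorem wave_cons_visited (graph : List (Int × List Int)) (lv node : Int) (rest : List Int)
    (v : PySem.Dict Int Int) (m : Int) (acc : List Int) (hc : v.contains node = true) :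
    wave graph lv (node :: rest) v m acc = wave graph lv rest v m acc := by
  rw [wave]
  simp [hc]

theorem wave_cons_some (graph : List (Int × List Int)) (lv node : Int) (rest : List Int)
    (v : PySem.Dict Int Int) (m : Int) (acc : List Int) (nbrs : List Int)
    (hc : v.contains node = false) (hgg : gget graph node = some nbrs) :
    wave graph lv (node :: rest) v m acc =
      wave graph lv rest (v.insert node lv) (if m < lv then lv else m) (acc ++ nbrs) := by
  rw [wave]
  simp [hc, hgg]

theorem wave_cons_none (graph : List (Int × List Int)) (lv node : Int) (rest : List Int)
    (v : PySem.Dict Int Int) (m : Int) (acc : List Int)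
    (hc : v.contains node = false) (hgg : gget graph node = none) :
    wave graph lv (node :: rest) v m acc =
      wave graph lv rest (v.insert node lv) (if m < lv then lv else m) acc := by
  rw [wave]
  simp [hc, hgg]

theorem rhs_shift (graph : List (Int × List Int)) (f2 : List Int) (lv : Int)
    (v : PySem.Dict Int Int) (m : Int) :
    bfsAltLoop graph (f2 ++ (wave graph lv [] v m []).2.2) (lv + 1)
        (wave graph lv [] v m []).1 (wave graph lv [] v m []).2.1 =
      bfsAltLoop graph ([] ++ (wave graph (lv + 1) f2 v m []).2.2) (lv + 1 + 1)
        (wave graph (lv + 1) f2 v m []).1 (wave graph (lv + 1) f2 v m []).2.1 := by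
  simp only [wave, List.append_nil, List.nil_append]
  exact altLoop_step graph f2 (lv + 1) v m

theorem main_lemma (graph : List (Int × List Int)) (queue : List (Int × Int))
    (v : PySem.Dict Int Int) (m : Int) :
    ∀ (f1 f2 : List Int) (lv : Int),
      queue = f1.map (fun n => (n, lv)) ++ f2.map (fun n => (n, lv + 1)) →
      bfsLoop graph queue v m =
        bfsAltLoop graph (f2 ++ (wave graph lv f1 v m []).2.2) (lv + 1)
          (wave graph lv f1 v m []).1 (wave graph lv f1 v m []).2.1 := by
  induction queue, v, m using bfsLoop.induct (graph := graph) with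
  | case1 visited maxLevel =>
    intro f1 f2 lv hq
    have hnil : f1 = [] ∧ f2 = [] := by
      cases f1 <;> cases f2 <;> simp_all
    obtain ⟨rfl, rfl⟩ := hnil
    simp only [wave, List.append_nil]
    rw [bfsLoop, bfsAltLoop]
  | case2 visited maxLevel node level rest hc ih =>
    intro f1 f2 lv hq
    rcases f1 with _ | ⟨x, f1'⟩
    · rcases f2 with _ | ⟨y, f2'⟩
      · simp at hq
      · simp only [List.map_nil, List.nil_append, List.map_cons, List.cons.injEq,
          Prod.mk.injEq] at hq
        obtain ⟨⟨rfl, rfl⟩, rfl⟩ := hq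
        rw [rhs_shift, wave_cons_visited graph _ _ _ _ _ _ hc,
          bfsLoop_cons_visited graph _ _ _ _ _ hc]
        exact ih f2' [] (lv + 1) (by simp)
    · simp only [List.map_cons, List.cons_append, List.cons.injEq, Prod.mk.injEq] at hq
      obtain ⟨⟨rfl, rfl⟩, rfl⟩ := hq
      rw [bfsLoop_cons_visited graph _ _ _ _ _ hc, wave_cons_visited graph _ _ _ _ _ _ hc]
      exact ih f1' f2 level rfl
  | case3 visited maxLevel node level rest hc nbrs hgg ih =>
    intro f1 f2 lv hq
    have hc' : visited.contains node = false := by simpa using hc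
    simp only [dite_eq_ite] at ih
    rcases f1 with _ | ⟨x, f1'⟩
    · rcases f2 with _ | ⟨y, f2'⟩
      · simp at hq
      · simp only [List.map_nil, List.nil_append, List.map_cons, List.cons.injEq,
          Prod.mk.injEq] at hq
        obtain ⟨⟨rfl, rfl⟩, rfl⟩ := hq
        rw [rhs_shift, wave_cons_some graph _ _ _ _ _ _ _ hc' hgg,
          bfsLoop_cons_some graph _ _ _ _ _ _ hc' hgg,
          ih f2' nbrs (lv + 1) (by simp), wave_acc _ _ _ _ _ ([] ++ nbrs)]
        simp
    · simp only [List.map_cons, List.cons_append, List.cons.injEq, Prod.mk.injEq] at hq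
      obtain ⟨⟨rfl, rfl⟩, rfl⟩ := hq
      rw [bfsLoop_cons_some graph _ _ _ _ _ _ hc' hgg,
        wave_cons_some graph _ _ _ _ _ _ _ hc' hgg,
        ih f1' (f2 ++ nbrs) level (by simp), wave_acc _ _ _ _ _ ([] ++ nbrs)]
      simp
  | case4 visited maxLevel node level rest hc hgg ih =>
    intro f1 f2 lv hq
    have hc' : visited.contains node = false := by simpa using hc
    simp only [dite_eq_ite] at ih
    rcases f1 with _ | ⟨x, f1'⟩
    · rcases f2 with _ | ⟨y, f2'⟩
      · simp at hq
      · simp only [List.map_nil, List.nil_append, List.map_cons, List.cons.injEq,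
          Prod.mk.injEq] at hq
        obtain ⟨⟨rfl, rfl⟩, rfl⟩ := hq
        rw [rhs_shift, wave_cons_none graph _ _ _ _ _ _ hc' hgg,
          bfsLoop_cons_none graph _ _ _ _ _ hc' hgg]
        exact ih f2' [] (lv + 1) (by simp)
    · simp only [List.map_cons, List.cons_append, List.cons.injEq, Prod.mk.injEq] at hq
      obtain ⟨⟨rfl, rfl⟩, rfl⟩ := hq
      rw [bfsLoop_cons_none graph _ _ _ _ _ hc' hgg, wave_cons_none graph _ _ _ _ _ _ hc' hgg]
      exact ih f1' f2 level rfl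

-- ===== VERDICT (by name: the statement is the Claim_ definition above) =====
theorem bfs_spec : Claim_equal_bfs := by
  intro graph start _
  unfold Spec_bfs bfs bfs_alt
  rw [main_lemma graph [(start, 1)] PySem.Dict.empty 0 [start] [] 1 (by simp),
    altLoop_step graph [start] 1 PySem.Dict.empty 0]
  simp
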